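-- pv_equiv track=rewrite | github.com/AgriculturalModelExchangeInitiative/PyCrop2ML | src/pycropml/transpiler/antlr_py/extraction.py | multiLineNumber
-- ===== SOURCE A (Python) =====
-- def multiLineNumber(vn, zz):
--     f=False
--     res = -1
--     for k, j in enumerate(zz):
--         if vn[0] in j:
--             z = zip(vn, zz[k:k+len(vn)])
--             check = [s in n for s,n in z]
--             if all(check):
--                 f=True
--                 res = k
--         else:
--             continue
--     if f: return res+1
--     return -1
-- ===== SOURCE B (Python) =====
-- def multiLineNumber(vn, zz):
--     # Sieve: mark every window index ruled out by some failing (line, pattern) pair,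
--     # then take the last unmarked window.
--     bad = [False] * len(zz)
--     for j, line in enumerate(zz):
--         for i, s in enumerate(vn):
--             if i <= j and s not in line:
--                 bad[j - i] = True
--     best = -1
--     for k, b in enumerate(bad):
--         if not b:
--             best = k
--     return best + 1 if best >= 0 else -1
-- ===== Notes on version B (the rewrite author's own statement) =====
-- stated objective: alternative
-- what changed: A scans every window and re-checks the whole vn-vs-lines zip there, keeping a flag and a last-match accumulator; B never checks windows: it sieves over (line, pattern) pairs, marking each window index ruled out by a failing pair in a boolean array, then takes the last unmarked index.
import Mathlib
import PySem

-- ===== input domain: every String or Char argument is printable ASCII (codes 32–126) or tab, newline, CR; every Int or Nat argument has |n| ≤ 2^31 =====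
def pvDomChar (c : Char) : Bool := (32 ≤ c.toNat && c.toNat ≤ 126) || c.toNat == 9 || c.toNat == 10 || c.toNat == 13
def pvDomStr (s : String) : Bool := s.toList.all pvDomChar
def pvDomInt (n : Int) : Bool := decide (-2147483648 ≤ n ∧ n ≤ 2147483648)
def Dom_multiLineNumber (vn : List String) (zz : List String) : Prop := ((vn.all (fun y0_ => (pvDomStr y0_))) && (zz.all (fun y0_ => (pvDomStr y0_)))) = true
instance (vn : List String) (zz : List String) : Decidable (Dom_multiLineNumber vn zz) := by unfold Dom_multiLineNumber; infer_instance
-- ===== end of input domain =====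

-- B replaces A's per-window re-check (flag + last-match accumulator) by a sieve:
-- it marks, pair by pair, every window index ruled out by a failing (line, pattern)
-- pair in a boolean array, then returns the last unmarked index + 1 (or -1).

-- ===== PORT A =====
-- one loop iteration of A: state (f, res); vn[0] is vn.headD "" (Pre_ makes the loop
-- body unreachable when vn = [], where Python raises IndexError)
def pvStepA (vn zz : List String) (st : Bool × Int) (kj : Int × String) : Bool × Int :=
  if PySem.Str.isIn (vn.headD "") kj.2 then
    if ((vn.zip (PySem.List.slice zz (some kj.1) (some (kj.1 + (vn.length : Int))))).map
          (fun sn => PySem.Str.isIn sn.1 sn.2)).all id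
    then (true, kj.1) else st
  else st

def multiLineNumber (vn : List String) (zz : List String) : Int :=
  let st := (PySem.List.enumerate zz 0).foldl (pvStepA vn zz) (false, -1)
  if st.1 then st.2 + 1 else -1

-- ===== PORT B =====
-- inner loop body: `if i <= j and s not in line: bad[j - i] = True`
def pvSieve (jl : Int × String) (b : List Bool) (is : Int × String) : List Bool :=
  if is.1 ≤ jl.1 && !(PySem.Str.isIn is.2 jl.2) then b.set (jl.1 - is.1).toNat true else b

def multiLineNumber_alt (vn : List String) (zz : List String) : Int :=
  let bad := (PySem.List.enumerate zz 0).foldl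
    (fun b jl => (PySem.List.enumerate vn 0).foldl (pvSieve jl) b)
    (List.replicate zz.length false)
  let best := (PySem.List.enumerate bad 0).foldl
    (fun best kb => if !kb.2 then kb.1 else best) (-1 : Int)
  if best ≥ 0 then best + 1 else -1

-- ===== PRECONDITION & SPEC =====
-- Pre_ excludes only vn = [] with zz non-empty, where A raises IndexError at vn[0].
def Pre_multiLineNumber (vn : List String) (zz : List String) : Prop := vn ≠ [] ∨ zz = []
instance (vn : List String) (zz : List String) : Decidable (Pre_multiLineNumber vn zz) := by
  unfold Pre_multiLineNumber; infer_instance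

def pvWitness_multiLineNumber : List String × List String := (["a"], ["ba", "c"])

def Spec_multiLineNumber (vn : List String) (zz : List String) (out : Int) : Prop :=
  out = multiLineNumber_alt vn zz
instance (vn : List String) (zz : List String) (out : Int) : Decidable (Spec_multiLineNumber vn zz out) := by
  unfold Spec_multiLineNumber; infer_instance

-- ===== CLAIM (what is proved, stated in full; the proofs are below) =====
def Claim_equal_multiLineNumber : Prop := ∀ (vn : List String) (zz : List String), Dom_multiLineNumber vn zz → Pre_multiLineNumber vn zz → Spec_multiLineNumber vn zz (multiLineNumber vn zz)

-- ===== LEMMAS AND PROOFS =====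

-- window test at index k: all(s in n for s, n in zip(vn, zz[k:k+len(vn)]))
def pvMatchB (vn zz : List String) (k : Nat) : Bool :=
  (vn.zip (PySem.List.slice zz (some (k : Int)) (some ((k : Int) + (vn.length : Int))))).all
    (fun sn => PySem.Str.isIn sn.1 sn.2)

-- backward search: k runs len(zz)-1, …, 0; k+1 on first match, else -1
def pvGoB (vn zz : List String) : Nat → Int
  | 0 => -1
  | k + 1 => if pvMatchB vn zz k then (k : Int) + 1 else pvGoB vn zz k

-- A's guarded test at element (k, zz[k]) equals the window test (vn non-empty)
theorem pvStepA_eq (v : String) (t zz : List String) (k : Nat) (hk : k < zz.length)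
    (st : Bool × Int) :
    pvStepA (v :: t) zz st ((k : Int), zz[k]) =
      (if pvMatchB (v :: t) zz k then (true, (k : Int)) else st) := by
  have hslice : PySem.List.slice zz (some (k : Int)) (some ((k : Int) + ((v :: t).length : Int)))
      = (zz.drop k).take (v :: t).length := by
    exact_mod_cast PySem.List.slice_natCast_add zz k (v :: t).length
  have hdrop : zz.drop k = zz[k] :: zz.drop (k + 1) := List.drop_eq_getElem_cons hk
  unfold pvStepA pvMatchB
  simp only [hslice, hdrop, List.headD_cons]
  have hmap : ∀ (l : List (String × String)),
      (l.map (fun sn => PySem.Str.isIn sn.1 sn.2)).all id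
        = l.all (fun sn => PySem.Str.isIn sn.1 sn.2) := by
    intro l; simp [List.all_map]
  rw [hmap]
  simp [List.all_cons]
  intro h1 h2
  exact absurd h2 (by simp [h1])

-- A's foldl over the first n enumerated elements computes pvGoB's answer
theorem pvFold_take (vn zz : List String) (hvn : vn ≠ []) (n : Nat) (hn : n ≤ zz.length) :
    (let st := ((PySem.List.enumerate zz 0).take n).foldl (pvStepA vn zz) (false, -1);
     if st.1 then st.2 + 1 else -1) = pvGoB vn zz n := by
  induction n with
  | zero => simp [pvGoB]
  | succ m ih =>
    obtain ⟨v, t, rfl⟩ : ∃ v t, vn = v :: t := by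
      cases vn with | nil => exact absurd rfl hvn | cons v t => exact ⟨v, t, rfl⟩
    have hm : m < zz.length := hn
    have hget : (PySem.List.enumerate zz 0)[m]? = some ((m : Int), zz[m]) := by
      rw [PySem.List.getElem?_enumerate]
      simp [List.getElem?_eq_getElem hm]
    have htake : (PySem.List.enumerate zz 0).take (m + 1)
        = (PySem.List.enumerate zz 0).take m ++ [((m : Int), zz[m])] := by
      rw [List.take_add_one, hget]; rfl
    have ih' := ih (Nat.le_of_lt hm)
    simp only [htake, List.foldl_append, List.foldl_cons, List.foldl_nil] at *
    rw [pvStepA_eq v t zz m hm]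
    by_cases hc : pvMatchB (v :: t) zz m = true
    · simp [hc, pvGoB]
    · simp only [Bool.not_eq_true] at hc
      simp [hc, pvGoB, ih']


-- ---- B side ----

-- the sieve fold keeps the length
theorem length_foldl_sieve (jl : Int × String) :
    ∀ (l : List (Int × String)) (b : List Bool), (l.foldl (pvSieve jl) b).length = b.length := by
  intro l
  induction l with
  | nil => intro b; rfl
  | cons p t ih =>
    intro b
    simp only [List.foldl_cons]
    rw [ih]
    unfold pvSieve
    split
    · rw [List.length_set]
    · rfl

-- value at index k after the sieve fold
theorem getD_foldl_sieve (jl : Int × String) :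
    ∀ (l : List (Int × String)) (b : List Bool) (k : Nat),
    (∀ is ∈ l, (is.1 ≤ jl.1 && !(PySem.Str.isIn is.2 jl.2)) = true → (jl.1 - is.1).toNat < b.length) →
    (l.foldl (pvSieve jl) b).getD k false
      = (b.getD k false ||
         l.any (fun is => (is.1 ≤ jl.1 && !(PySem.Str.isIn is.2 jl.2)) && ((jl.1 - is.1).toNat == k))) := by
  intro l
  induction l with
  | nil => intro b k _; simp
  | cons p t ih =>
    intro b k hf
    simp only [List.foldl_cons, List.any_cons]
    by_cases hc : (p.1 ≤ jl.1 && !(PySem.Str.isIn p.2 jl.2)) = true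
    · have hb : (jl.1 - p.1).toNat < b.length := hf p (List.mem_cons_self ..) hc
      have hstep : pvSieve jl b p = b.set (jl.1 - p.1).toNat true := by
        unfold pvSieve; rw [if_pos hc]
      rw [hstep, ih _ k (by
        intro q hq hcq
        rw [List.length_set]
        exact hf q (List.mem_cons_of_mem _ hq) hcq)]
      by_cases hk : (jl.1 - p.1).toNat = k
      · subst hk
        have hL : (b.set (jl.1 - p.1).toNat true).getD (jl.1 - p.1).toNat false = true := by
          rw [List.getD_eq_getElem?_getD]
          have : (b.set (jl.1 - p.1).toNat true)[(jl.1 - p.1).toNat]? = some true := by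
            simp [hb]
          rw [this]; rfl
        rw [hL, hc]
        simp
      · have hL : (b.set (jl.1 - p.1).toNat true).getD k false = b.getD k false := by
          rw [List.getD_eq_getElem?_getD, List.getD_eq_getElem?_getD]
          congr 1
          simp [hk]
        rw [hL]
        have hke : (((jl.1 - p.1).toNat == k) : Bool) = false := by simp [hk]
        rw [hke]
        simp
    · have hstep : pvSieve jl b p = b := by unfold pvSieve; rw [if_neg hc]
      rw [hstep, ih _ k (by intro q hq hcq; exact hf q (List.mem_cons_of_mem _ hq) hcq)]
      have hce : (decide (p.1 ≤ jl.1) && !(PySem.Str.isIn p.2 jl.2)) = false :=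
        Bool.not_eq_true _ ▸ eq_false_of_ne_true hc
      rw [hce]
      simp

-- value at index k after the whole double fold
theorem pvOuter_getD (vn : List String) :
    ∀ (ps : List (Int × String)) (b : List Bool) (k : Nat),
    (∀ p ∈ ps, 0 ≤ p.1 ∧ p.1.toNat < b.length) →
    (ps.foldl (fun b jl => (PySem.List.enumerate vn 0).foldl (pvSieve jl) b) b).getD k false
      = (b.getD k false ||
         ps.any (fun jl => (PySem.List.enumerate vn 0).any
           (fun is => (is.1 ≤ jl.1 && !(PySem.Str.isIn is.2 jl.2)) && ((jl.1 - is.1).toNat == k)))) := by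
  intro ps
  induction ps with
  | nil => intro b k _; simp
  | cons p t ih =>
    intro b k hp
    obtain ⟨hp0, hplen⟩ := hp p (List.mem_cons_self ..)
    have hinlen : ((PySem.List.enumerate vn 0).foldl (pvSieve p) b).length = b.length :=
      length_foldl_sieve p _ b
    have hinner := getD_foldl_sieve p (PySem.List.enumerate vn 0) b k (by
      intro is his hcis
      rw [PySem.List.mem_enumerate_iff] at his
      obtain ⟨i, hi, rfl⟩ := his
      simp only [Bool.and_eq_true, zero_add] at hcis
      have h1 : (i : Int) ≤ p.1 := of_decide_eq_true hcis.1
      omega)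
    simp only [List.foldl_cons, List.any_cons]
    rw [ih _ k (by
      intro q hq
      have := hp q (List.mem_cons_of_mem _ hq)
      rw [hinlen]; exact this), hinner]
    rw [Bool.or_assoc]

-- the window test rephrased: some zipped pair fails
theorem pvMatchB_false_iff (vn zz : List String) (k : Nat) :
    pvMatchB vn zz k = false ↔
      ∃ i, ∃ (h1 : i < vn.length), ∃ (h2 : k + i < zz.length),
        PySem.Str.isIn (vn[i]'h1) (zz[k + i]'h2) = false := by
  have hslice : PySem.List.slice zz (some (k : Int)) (some ((k : Int) + (vn.length : Int)))
      = (zz.drop k).take vn.length := by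
    exact_mod_cast PySem.List.slice_natCast_add zz k vn.length
  unfold pvMatchB
  rw [hslice]
  rw [List.all_eq_false]
  constructor
  · rintro ⟨x, hx, hfail⟩
    rw [List.mem_iff_getElem] at hx
    obtain ⟨i, hi, rfl⟩ := hx
    have hlen : (vn.zip ((zz.drop k).take vn.length)).length
        = min vn.length (min vn.length (zz.length - k)) := by
      simp [List.length_zip]
    rw [hlen] at hi
    have hiv : i < vn.length := by omega
    have hiz : k + i < zz.length := by omega
    refine ⟨i, hiv, hiz, ?_⟩
    have : (vn.zip ((zz.drop k).take vn.length))[i]'(by simp [List.length_zip]; omega)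
        = (vn[i]'hiv, zz[k + i]'(by omega)) := by
      simp [List.getElem_zip, List.getElem_take, List.getElem_drop]
    rw [this] at hfail
    simpa using hfail
  · rintro ⟨i, hiv, hiz, hfail⟩
    have hil : i < (vn.zip ((zz.drop k).take vn.length)).length := by
      simp [List.length_zip]; omega
    refine ⟨(vn[i]'hiv, zz[k + i]'(by omega)), ?_, by simpa using hfail⟩
    rw [List.mem_iff_getElem]
    exact ⟨i, hil, by simp [List.getElem_zip, List.getElem_take, List.getElem_drop]⟩

-- the sieve marks index k exactly when the window at k fails
theorem pvBad_getD (vn zz : List String) (k : Nat) (hk : k < zz.length) :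
    ((PySem.List.enumerate zz 0).foldl
        (fun b jl => (PySem.List.enumerate vn 0).foldl (pvSieve jl) b)
        (List.replicate zz.length false)).getD k false
      = !pvMatchB vn zz k := by
  rw [pvOuter_getD vn (PySem.List.enumerate zz 0) _ k (by
    intro p hp
    rw [PySem.List.mem_enumerate_iff] at hp
    obtain ⟨j, hj, rfl⟩ := hp
    simp only [zero_add, List.length_replicate]
    constructor
    · exact_mod_cast Int.natCast_nonneg j
    · simpa using hj)]
  have hrep : (List.replicate zz.length false).getD k false = false := by
    simp [List.getD_eq_getElem?_getD, hk]
  rw [hrep, Bool.false_or]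
  have hiff : ((PySem.List.enumerate zz 0).any
      (fun jl => (PySem.List.enumerate vn 0).any
        (fun is => (is.1 ≤ jl.1 && !(PySem.Str.isIn is.2 jl.2)) && ((jl.1 - is.1).toNat == k)))) = true
      ↔ pvMatchB vn zz k = false := by
    rw [List.any_eq_true]
    constructor
    · rintro ⟨p, hp, hP⟩
      rw [PySem.List.mem_enumerate_iff] at hp
      obtain ⟨j, hj, rfl⟩ := hp
      rw [List.any_eq_true] at hP
      obtain ⟨q, hq, hQ⟩ := hP
      rw [PySem.List.mem_enumerate_iff] at hq
      obtain ⟨i, hi, rfl⟩ := hq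
      simp only [zero_add, Bool.and_eq_true, beq_iff_eq, Bool.not_eq_true', decide_eq_true_eq] at hQ
      obtain ⟨⟨hij, hfail⟩, hk'⟩ := hQ
      have hji : j = k + i := by omega
      rw [pvMatchB_false_iff]
      exact ⟨i, hi, by omega, by subst hji; exact hfail⟩
    · intro hM
      rw [pvMatchB_false_iff] at hM
      obtain ⟨i, hi, hiz, hfail⟩ := hM
      refine ⟨((k + i : Nat), zz[k + i]'hiz), ?_, ?_⟩
      · rw [PySem.List.mem_enumerate_iff]
        exact ⟨k + i, hiz, by simp⟩
      · rw [List.any_eq_true]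
        refine ⟨((i : Nat), vn[i]'hi), ?_, ?_⟩
        · rw [PySem.List.mem_enumerate_iff]
          exact ⟨i, hi, by simp⟩
        · simp only [Bool.and_eq_true, beq_iff_eq, Bool.not_eq_true', decide_eq_true_eq]
          refine ⟨⟨by exact_mod_cast Nat.le_add_left i k, hfail⟩, by omega⟩
  cases hM : pvMatchB vn zz k
  · simp only [Bool.not_false]
    exact hiff.mpr hM
  · simp only [Bool.not_true]
    by_contra h
    simp only [Bool.not_eq_false] at h
    exact absurd hM (by rw [hiff.mp h]; simp)

-- the sieve result, as a list
theorem pvBad_list (vn zz : List String) :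
    (PySem.List.enumerate zz 0).foldl
        (fun b jl => (PySem.List.enumerate vn 0).foldl (pvSieve jl) b)
        (List.replicate zz.length false)
      = (List.range zz.length).map (fun k => !pvMatchB vn zz k) := by
  have hlen : ∀ (ps : List (Int × String)) (b : List Bool),
      (ps.foldl (fun b jl => (PySem.List.enumerate vn 0).foldl (pvSieve jl) b) b).length
        = b.length := by
    intro ps
    induction ps with
    | nil => intro b; rfl
    | cons p t ih => intro b; simp only [List.foldl_cons]; rw [ih, length_foldl_sieve]
  apply List.ext_getElem
  · rw [hlen]; simp
  · intro k h1 h2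
    have hk : k < zz.length := by
      have := h1; rw [hlen] at this; simpa using this
    rw [← List.getD_eq_getElem _ false h1, pvBad_getD vn zz k hk]
    simp [List.getElem_map, List.getElem_range]

-- the last-unmarked scan over the sieve computes pvGoB
theorem pvBest_fold (vn zz : List String) : ∀ (n : Nat),
    (let best := (PySem.List.enumerate ((List.range n).map (fun k => !pvMatchB vn zz k)) 0).foldl
        (fun best kb => if !kb.2 then kb.1 else best) (-1 : Int);
     if best ≥ 0 then best + 1 else -1) = pvGoB vn zz n := by
  intro n
  induction n with
  | zero => simp [pvGoB]
  | succ m ih =>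
    have hrange : (List.range (m + 1)).map (fun k => !pvMatchB vn zz k)
        = (List.range m).map (fun k => !pvMatchB vn zz k) ++ [!pvMatchB vn zz m] := by
      rw [List.range_succ, List.map_append]; rfl
    rw [hrange, PySem.List.enumerate_append]
    simp only [List.length_map, List.length_range, PySem.List.enumerate_cons,
      PySem.List.enumerate_nil, List.foldl_append, List.foldl_cons, List.foldl_nil, zero_add]
    cases hM : pvMatchB vn zz m
    · simp only [Bool.not_false, Bool.not_true] at ih ⊢
      simpa [pvGoB, hM] using ih
    · simp only [Bool.not_true, Bool.not_false]
      have : ((0 : Int) + (m : Int)) ≥ 0 := by positivity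
      simp [pvGoB, hM]

-- B's port equals the backward search, on all inputs
theorem pvAlt_eq_goB (vn zz : List String) :
    multiLineNumber_alt vn zz = pvGoB vn zz zz.length := by
  unfold multiLineNumber_alt
  simp only []
  rw [pvBad_list vn zz]
  exact pvBest_fold vn zz zz.length

-- ===== VERDICT (by name: the statements are the Claim_ definitions above) =====
theorem multiLineNumber_spec : Claim_equal_multiLineNumber := by
  intro vn zz _ hpre
  unfold Spec_multiLineNumber
  rw [pvAlt_eq_goB]
  cases hpre with
  | inl hvn =>
    have := pvFold_take vn zz hvn zz.length (le_refl _)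
    unfold multiLineNumber
    simpa [List.take_of_length_le, PySem.List.length_enumerate] using this
  | inr hzz =>
    subst hzz
    simp [multiLineNumber, PySem.List.enumerate, pvGoB]
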